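/- GENERATED by farm/mkstatement.py from design/units.tsv (unit `exp`) and the Specs of Vorbis/Spec/*.lean — do not edit.
   THE STATEMENT of the proof unit `exp`: the function `exp` (85 instructions) satisfies its contract,
   given the contracts of its callees. What the names mean: Vorbis/Spec/Basic.lean. The theorem to prove:
   `theorem exp_ok : Vorbis.Spec.exp.Statement`. -/
import Vorbis.Spec.Libm
namespace Vorbis.Spec.exp
open X86 X86.User Asan

/-- The statement of unit `exp`. -/
def Statement : Prop :=
  ∀ (Lay : Layout) (_hLay : Lay.hi = 0x1000000) (μ : Microarch) (_hμ : UserX.MicroOK μ) (u₀ : State)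
    (_hcode : HasCodeNat Lay u₀ Vorbis.L.exp.entry Vorbis.Code.code_exp.nat Vorbis.L.exp.size)
    (_h_two_to : ∀ (others : List Obj) (frames : List (Nat × FrameLayout)), Calls Lay μ Vorbis.WayInv (Vorbis.conv u₀) Vorbis.L.two_to.entry (Vorbis.Spec.two_to.spec others frames))
    (_h_floor : ∀ (others : List Obj) (frames : List (Nat × FrameLayout)), Calls Lay μ Vorbis.WayInv (Vorbis.conv u₀) Vorbis.L.floor.entry (Vorbis.Spec.floor.spec others frames))
    (_h_ldexp : ∀ (others : List Obj) (frames : List (Nat × FrameLayout)), Calls Lay μ Vorbis.WayInv (Vorbis.conv u₀) Vorbis.L.ldexp.entry (Vorbis.Spec.ldexp.spec others frames)),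
    ∀ (others : List Obj) (frames : List (Nat × FrameLayout)), Calls Lay μ Vorbis.WayInv (Vorbis.conv u₀) Vorbis.L.exp.entry (Vorbis.Spec.exp.spec others frames)

end Vorbis.Spec.exp
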